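-- pv_equiv track=rewrite | github.com/kofflo/cobram | src/utils.py | get_positions_from_scores
-- ===== SOURCE A (Python) =====
-- def order_dict_by_values(input_dictionary, reverse=False):
--     return {
--         k: input_dictionary[k] for k in sorted(input_dictionary.keys(),
--                                                key=input_dictionary.__getitem__, reverse=reverse)
--     }
--
-- def get_positions_from_scores(scores):
--     scores = order_dict_by_values(scores, reverse=True)
--     positions = {}
--     last_value = None
--     last_index = None
--     for index, (key, value) in enumerate(scores.items()):
--         if value == last_value:
--             positions[key] = last_index
--         else:
--             positions[key] = index
--         last_index = positions[key]
--         last_value = value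
--     return positions
-- ===== SOURCE B (Python) =====
-- def get_positions_from_scores(scores):
--     # A key's 0-indexed competition rank equals the number of strictly greater scores.
--     ordered = sorted(scores.keys(), key=scores.__getitem__, reverse=True)
--     values = list(scores.values())
--     return {key: sum(1 for v in values if v > scores[key]) for key in ordered}
-- ===== Notes on version B (the rewrite author's own statement) =====
-- stated objective: simpler
-- what changed: Replaces A's stateful last_value/last_index scan over the sorted items with a stateless per-key count of strictly greater scores (rank = number of scores above), keeping the same descending sort for output order.
import Mathlib
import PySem

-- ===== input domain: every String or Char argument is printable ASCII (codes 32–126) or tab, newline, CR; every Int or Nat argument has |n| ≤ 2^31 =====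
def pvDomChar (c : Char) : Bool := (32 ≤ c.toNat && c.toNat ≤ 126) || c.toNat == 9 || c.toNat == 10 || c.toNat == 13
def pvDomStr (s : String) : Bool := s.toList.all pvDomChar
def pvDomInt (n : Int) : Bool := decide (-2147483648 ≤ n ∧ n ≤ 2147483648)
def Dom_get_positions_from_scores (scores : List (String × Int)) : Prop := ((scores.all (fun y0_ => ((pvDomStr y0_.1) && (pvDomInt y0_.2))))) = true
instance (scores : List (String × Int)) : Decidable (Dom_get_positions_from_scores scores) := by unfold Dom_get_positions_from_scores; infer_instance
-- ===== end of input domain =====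

-- B replaces A's stateful last_value/last_index scan with a stateless per-key count of
-- strictly greater scores (same descending sort, so the same output order); simpler, not faster.


-- ===== PORT A =====
-- The loop body of A. last_value/last_index are None exactly together (only before the first
-- iteration, where the 'value == last_value' branch cannot fire since value is an int), so the
-- pair is modelled as one Option. Every key looked up comes from the dict itself, so
-- scores[key] (__getitem__) never raises and is getD.
def pvGoA (d : PySem.Dict String Int) (pos : PySem.Dict String Int) (idx : Nat)
    (last : Option (Int × Int)) : List String → PySem.Dict String Int
  | [] => pos
  | k :: rest =>
    let v := d.getD k 0
    let p : Int := match last with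
      | some (lv, li) => if v = lv then li else (idx : Int)
      | none => (idx : Int)
    pvGoA d (pos.insert k p) (idx + 1) (some (v, p)) rest

def get_positions_from_scores (scores : List (String × Int)) : List (String × Int) :=
  let d := PySem.Dict.ofList scores
  -- order_dict_by_values(scores, reverse=True): its items are (k, d[k]) for k in the sorted key order
  let ordered := PySem.List.sorted d.keys (fun k => d.getD k 0) true
  (pvGoA d PySem.Dict.empty 0 none ordered).items

-- ===== PORT B =====
def get_positions_from_scores_alt (scores : List (String × Int)) : List (String × Int) :=
  let d := PySem.Dict.ofList scores
  let ordered := PySem.List.sorted d.keys (fun k => d.getD k 0) true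
  ordered.map (fun k =>
    (k, (d.values.map (fun v => if d.getD k 0 < v then (1 : Int) else 0)).sum))

-- ===== PRECONDITION & SPEC =====
def Spec_get_positions_from_scores (scores : List (String × Int)) (out : List (String × Int)) : Prop := out = get_positions_from_scores_alt scores
instance (scores : List (String × Int)) (out : List (String × Int)) : Decidable (Spec_get_positions_from_scores scores out) := by unfold Spec_get_positions_from_scores; infer_instance

-- ===== CLAIM (what is proved, stated in full; the proofs are below) =====
def Claim_equal_get_positions_from_scores : Prop := ∀ (scores : List (String × Int)), Dom_get_positions_from_scores scores → Spec_get_positions_from_scores scores (get_positions_from_scores scores)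

-- ===== LEMMAS AND PROOFS =====

-- A's loop, as the pure list of (key, position) pairs it produces.
def pvPosList (d : PySem.Dict String Int) (idx : Nat) (last : Option (Int × Int)) :
    List String → List (String × Int)
  | [] => []
  | k :: rest =>
    let v := d.getD k 0
    let p : Int := match last with
      | some (lv, li) => if v = lv then li else (idx : Int)
      | none => (idx : Int)
    (k, p) :: pvPosList d (idx + 1) (some (v, p)) rest

theorem pvGoA_items (d : PySem.Dict String Int) :
    ∀ (l : List String) (pos : PySem.Dict String Int) (idx : Nat) (last : Option (Int × Int)),
    (∀ k ∈ l, pos.contains k = false) → l.Nodup →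
    (pvGoA d pos idx last l).items = pos.items ++ pvPosList d idx last l := by
  intro l
  induction l with
  | nil => intro pos idx last _ _; simp [pvGoA, pvPosList]
  | cons k rest ih =>
    intro pos idx last hfresh hnd
    simp only [pvGoA, pvPosList]
    rw [ih _ _ _ ?_ (List.nodup_cons.mp hnd).2]
    · rw [PySem.Dict.items_insert_of_not_contains _ _ (hfresh k (by simp))]
      simp
    · intro k' hk'
      rw [PySem.Dict.contains_insert]
      have hne : k' ≠ k := fun h => (List.nodup_cons.mp hnd).1 (h ▸ hk')
      simp [hne, hfresh k' (List.mem_cons_of_mem _ hk')]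

-- The invariant of A's loop: on a descending suffix l, with pre the already-processed values
-- (all ≥ the last value), the stateful loop assigns each key the count of strictly greater
-- values in the whole list pre ++ l.map key.
theorem pvPosList_eq (d : PySem.Dict String Int) :
    ∀ (l : List String) (pre : List Int) (last : Option (Int × Int)),
    (l.map (fun k => d.getD k 0)).Pairwise (fun a b => b ≤ a) →
    (match last with
     | none => pre = []
     | some (lv, li) =>
        (∀ k ∈ l, d.getD k 0 ≤ lv) ∧ (∀ x ∈ pre, lv ≤ x) ∧
          li = (pre.countP (fun x => decide (lv < x)) : Int)) →
    pvPosList d pre.length last l =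
      l.map (fun k => (k,
        (((pre ++ l.map (fun k => d.getD k 0)).countP (fun x => decide (d.getD k 0 < x)) : Nat) : Int))) := by
  intro l
  induction l with
  | nil => intro pre last _ _; simp [pvPosList]
  | cons k rest ih =>
    intro pre last hpair hlast
    have hpair2 : (d.getD k 0 :: rest.map (fun k' => d.getD k' 0)).Pairwise
        (fun a b => b ≤ a) := by simpa using hpair
    have hpairc := List.pairwise_cons.mp hpair2
    have hrest_le : ∀ k' ∈ rest, d.getD k' 0 ≤ d.getD k 0 := by
      intro k' hk'; exact hpairc.1 _ (List.mem_map_of_mem hk')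
    have hcount_tail : (rest.map (fun k' => d.getD k' 0)).countP
        (fun x => decide (d.getD k 0 < x)) = 0 := by
      rw [List.countP_eq_zero]
      intro x hx
      simp only [List.mem_map] at hx
      obtain ⟨k', hk', rfl⟩ := hx
      simpa using not_lt.mpr (hrest_le k' hk')
    -- the tail of the goal, shared by all cases: the recursive call with pre' = pre ++ [value]
    have htail : ∀ (p : Int),
        p = (((pre ++ d.getD k 0 :: rest.map (fun k'' => d.getD k'' 0)).countP
              (fun x => decide (d.getD k 0 < x)) : Nat) : Int) →
        (∀ x ∈ pre, d.getD k 0 ≤ x) →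
        pvPosList d (pre.length + 1) (some (d.getD k 0, p)) rest =
          rest.map (fun k' => (k',
            (((pre ++ d.getD k 0 :: rest.map (fun k'' => d.getD k'' 0)).countP
               (fun x => decide (d.getD k' 0 < x)) : Nat) : Int))) := by
      intro p hp hpre_ge
      have hlen : pre.length + 1 = (pre ++ [d.getD k 0]).length := by simp
      have hinv : (∀ k' ∈ rest, d.getD k' 0 ≤ d.getD k 0) ∧
          (∀ x ∈ pre ++ [d.getD k 0], d.getD k 0 ≤ x) ∧
          p = (((pre ++ [d.getD k 0]).countP (fun x => decide (d.getD k 0 < x)) : Nat) : Int) := by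
        refine ⟨hrest_le, ?_, ?_⟩
        · intro x hx
          rcases List.mem_append.mp hx with h | h
          · exact hpre_ge x h
          · simp at h; omega
        · rw [hp]
          simp [List.countP_append, hcount_tail]
      rw [hlen, ih (pre ++ [d.getD k 0]) (some (d.getD k 0, p)) hpairc.2 hinv]
      apply List.map_congr_left
      intro k' _
      simp [List.countP_append, List.countP_cons]
    match last, hlast with
    | none, hlast =>
      subst hlast
      simp only [pvPosList, List.map_cons, List.length_nil, List.nil_append]
      have hcnt : ((d.getD k 0 :: rest.map (fun k' => d.getD k' 0)).countP
          (fun x => decide (d.getD k 0 < x)) : Nat) = 0 := by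
        simp [hcount_tail]
      refine List.cons_eq_cons.mpr ⟨by rw [hcnt], ?_⟩
      have := htail ((0 : Nat) : Int) (by simp [hcnt]) (by simp)
      simpa using this
    | some (lv, li), ⟨h1, h2, h3⟩ =>
      simp only [pvPosList, List.map_cons]
      by_cases hveq : d.getD k 0 = lv
      · subst hveq
        rw [if_pos rfl]
        have hcnt : ((pre ++ d.getD k 0 :: rest.map (fun k' => d.getD k' 0)).countP
            (fun x => decide (d.getD k 0 < x)) : Nat)
            = pre.countP (fun x => decide (d.getD k 0 < x)) := by
          rw [List.countP_append, List.countP_cons]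
          simp [hcount_tail]
        refine List.cons_eq_cons.mpr ⟨?_, ?_⟩
        · rw [hcnt, h3]
        · exact htail li (by rw [h3, hcnt]) h2
      · simp only [if_neg hveq]
        have hvlt : d.getD k 0 < lv := lt_of_le_of_ne (h1 k (by simp)) hveq
        have hpre_gt : ∀ x ∈ pre, d.getD k 0 < x := fun x hx => lt_of_lt_of_le hvlt (h2 x hx)
        have hcnt : ((pre ++ d.getD k 0 :: rest.map (fun k' => d.getD k' 0)).countP
            (fun x => decide (d.getD k 0 < x)) : Nat) = pre.length := by
          rw [List.countP_append, List.countP_cons]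
          have hh : pre.countP (fun x => decide (d.getD k 0 < x)) = pre.length := by
            rw [List.countP_eq_length]
            intro x hx; exact decide_eq_true (hpre_gt x hx)
          simp [hh, hcount_tail]
        refine List.cons_eq_cons.mpr ⟨?_, ?_⟩
        · rw [hcnt]
        · exact htail ((pre.length : Nat) : Int) (by rw [hcnt])
            (fun x hx => le_of_lt (hpre_gt x hx))

theorem pvValues_eq (d : PySem.Dict String Int) (hnd : d.keys.Nodup) :
    d.keys.map (fun k => d.getD k 0) = d.values := by
  have hk : d.keys = d.items.map Prod.fst := rfl
  have hv : d.values = d.items.map Prod.snd := rfl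
  rw [hk, hv, List.map_map]
  apply List.map_congr_left
  intro p hp
  exact PySem.Dict.getD_of_mem_items d (show (p.1, p.2) ∈ d.items by simpa using hp) hnd 0

-- ===== VERDICT (by name: the statement is the Claim_ definition above) =====
theorem get_positions_from_scores_spec : Claim_equal_get_positions_from_scores := by
  intro scores _
  unfold Spec_get_positions_from_scores get_positions_from_scores get_positions_from_scores_alt
  set d := PySem.Dict.ofList scores with hd
  set ordered := PySem.List.sorted d.keys (fun k => d.getD k 0) true with hord
  have hndk : d.keys.Nodup := PySem.Dict.nodup_keys_ofList scores
  have hnd : ordered.Nodup :=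
    ((PySem.List.sorted_perm d.keys (fun k => d.getD k 0) true).nodup_iff).mpr hndk
  rw [pvGoA_items d ordered PySem.Dict.empty 0 none (by intro k _; simp) hnd]
  have h0 : (0 : Nat) = ([] : List Int).length := rfl
  rw [show (PySem.Dict.empty : PySem.Dict String Int).items = [] from rfl, List.nil_append,
      h0, pvPosList_eq d ordered [] none ?_ rfl]
  · apply List.map_congr_left
    intro k _
    have hperm : (ordered.map (fun k' => d.getD k' 0)).Perm d.values := by
      rw [← pvValues_eq d hndk]
      exact (PySem.List.sorted_perm d.keys (fun k' => d.getD k' 0) true).map _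
    have hsum : (d.values.map (fun v => if d.getD k 0 < v then (1 : Int) else 0)).sum
        = ((d.values.countP (fun x => decide (d.getD k 0 < x)) : Nat) : Int) := by
      simpa using PySem.List.sum_map_ite_one_zero (fun v => decide (d.getD k 0 < v)) d.values
    rw [hsum, List.nil_append, (hperm.countP_eq _)]
  · exact List.Pairwise.map (fun k => d.getD k 0) (fun a b h => h)
      (PySem.List.sorted_pairwise_rev d.keys (fun k => d.getD k 0))
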